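-- pv_equiv track=rewrite | github.com/PaNOSC-ViNYL/ase | ase/calculators/siesta/siesta.py | get_nao
-- ===== SOURCE A (Python) =====
-- def get_nao(symbol, basis):
--     """Number of basis functions.
--
--     Parameters
--     ==========
--     symbol: str
--         The chemical symbol.
--     basis: str
--         Basis function type.
--     """
--     ls = valence_config[symbol]
--     nao = 0
--     zeta = {'s':1, 'd':2, 't':3, 'q':4}
--     nzeta = zeta[basis[0]]
--     is_pol = 'p' in basis
--     for l in ls:
--         nao += (2 * l + 1) * nzeta
--     if is_pol:
--         l_pol = None
--         l = -1
--         while l_pol is None: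
--             l += 1
--             if not l in ls:
--                 l_pol = l
--         nao += 2 * l_pol + 1
--     return nao
--
-- valence_config = {
--     'H': (0,),
--     'C': (0, 1),
--     'N': (0, 1),
--     'O': (0, 1),
--     'S': (0, 1),
--     'Li': (0,),
--     'Na': (0,),
--     'Ni': (0, 2),
--     'Cu': (0, 2),
--     'Pd': (0, 2),
--     'Ag': (0, 2),
--     'Pt': (0, 2),
--     'Au': (0, 2)}
-- ===== SOURCE B (Python) =====
-- valence_config = {
--     'H': (0,),
--     'C': (0, 1),
--     'N': (0, 1),
--     'O': (0, 1),
--     'S': (0, 1),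
--     'Li': (0,),
--     'Na': (0,),
--     'Ni': (0, 2),
--     'Cu': (0, 2),
--     'Pd': (0, 2),
--     'Ag': (0, 2),
--     'Pt': (0, 2),
--     'Au': (0, 2)}
--
--
-- def _pol_l(ls):
--     """Smallest non-negative l absent from ls, by set difference (always <= len(ls))."""
--     return min(set(range(len(ls) + 1)) - set(ls))
--
--
-- # Precomputed once per module load: symbol -> (basis functions per zeta, polarization term).
-- _nao_table = {sym: (sum(2 * l + 1 for l in ls), 2 * _pol_l(ls) + 1)
--               for sym, ls in valence_config.items()}
--
-- _zeta = {'s': 1, 'd': 2, 't': 3, 'q': 4}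
--
--
-- def get_nao(symbol, basis):
--     """Number of basis functions: O(1) table lookup at call time."""
--     base, pol = _nao_table[symbol]
--     nao = _zeta[basis[0]] * base
--     if 'p' in basis:
--         nao += pol
--     return nao
-- ===== Notes on version B (the rewrite author's own statement) =====
-- stated objective: alternative
-- what changed: B precomputes a per-symbol table (per-zeta basis count, polarization term) once at module load -- the polarization l found by set difference + min instead of A's open-ended while search -- so each call is a pure table lookup and multiply with no loop.
import Mathlib
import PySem

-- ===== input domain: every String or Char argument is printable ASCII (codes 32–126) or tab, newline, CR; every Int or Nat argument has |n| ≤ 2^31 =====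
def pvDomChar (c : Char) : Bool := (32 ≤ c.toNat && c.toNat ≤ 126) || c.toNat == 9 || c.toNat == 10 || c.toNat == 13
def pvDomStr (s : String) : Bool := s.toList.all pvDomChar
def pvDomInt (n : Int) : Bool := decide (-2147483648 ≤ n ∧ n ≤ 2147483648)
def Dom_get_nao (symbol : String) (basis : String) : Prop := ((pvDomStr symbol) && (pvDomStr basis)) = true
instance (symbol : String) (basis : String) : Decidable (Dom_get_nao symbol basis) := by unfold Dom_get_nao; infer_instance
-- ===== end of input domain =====

-- B precomputes a per-symbol table (per-zeta count, polarization term) once at module load,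
-- turning each call into a table lookup with no loop: objective 'alternative'.

-- shared module constant valence_config (a dict in the Python module, used by both A and B)
def valenceConfig : PySem.Dict String (List Int) :=
  PySem.Dict.ofList [("H", [0]), ("C", [0, 1]), ("N", [0, 1]), ("O", [0, 1]), ("S", [0, 1]),
    ("Li", [0]), ("Na", [0]), ("Ni", [0, 2]), ("Cu", [0, 2]), ("Pd", [0, 2]),
    ("Ag", [0, 2]), ("Pt", [0, 2]), ("Au", [0, 2])]

-- ===== PORT A =====
-- the zeta dict literal {'s':1,'d':2,'t':3,'q':4} inside A
def zetaDictA : PySem.Dict Char Int :=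
  PySem.Dict.ofList [('s', 1), ('d', 2), ('t', 3), ('q', 4)]

-- A's `while l_pol is None` loop: smallest l ≥ current not in ls; fuel ls.length+1 suffices
-- because among 0..ls.length at least one value is missing from ls.
def lpolLoop (ls : List Int) : Nat → Int → Int
  | 0, l => l
  | fuel + 1, l => if l ∈ ls then lpolLoop ls fuel (l + 1) else l

def get_nao (symbol : String) (basis : String) : Int :=
  let ls := (valenceConfig.get? symbol).getD []          -- KeyError excluded by Pre_
  let nzeta := (zetaDictA.get? ((PySem.Str.pyGet? basis 0).getD ' ')).getD 0  -- Index/KeyError excluded by Pre_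
  let is_pol := PySem.Str.isIn "p" basis
  let nao := ls.foldl (fun acc l => acc + (2 * l + 1) * nzeta) 0
  if is_pol then nao + (2 * lpolLoop ls (ls.length + 1) 0 + 1) else nao

-- ===== PORT B =====
-- B's _pol_l: min of set(range(len(ls)+1)) - set(ls)  (min over a set: order-independent)
def polL (ls : List Int) : Int :=
  (PySem.List.min?
    (PySem.Set.diff (PySem.Set.ofList (PySem.List.pyRange 0 (ls.length + 1) 1)) ls)
    (fun x => x)).getD 0   -- the set is never empty, so min never raises

-- B's module-level table _nao_table: symbol -> (per-zeta count, polarization term)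
def naoTable : PySem.Dict String (Int × Int) :=
  PySem.Dict.ofList (valenceConfig.items.map
    (fun p => (p.1, ((p.2.map (fun l => 2 * l + 1)).sum, 2 * polL p.2 + 1))))

def zetaDictB : PySem.Dict Char Int :=
  PySem.Dict.ofList [('s', 1), ('d', 2), ('t', 3), ('q', 4)]

def get_nao_alt (symbol : String) (basis : String) : Int :=
  let bp := (naoTable.get? symbol).getD (0, 0)           -- KeyError excluded by Pre_
  let nao := ((zetaDictB.get? ((PySem.Str.pyGet? basis 0).getD ' ')).getD 0) * bp.1  -- Index/KeyError excluded by Pre_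
  if PySem.Str.isIn "p" basis then nao + bp.2 else nao

-- ===== PRECONDITION & SPEC =====
-- Pre_ excludes exactly the inputs where A raises: unknown chemical symbol (KeyError),
-- empty basis (IndexError), or a first basis character outside 'sdtq' (KeyError).
def Pre_get_nao (symbol : String) (basis : String) : Prop :=
  symbol ∈ ["H", "C", "N", "O", "S", "Li", "Na", "Ni", "Cu", "Pd", "Ag", "Pt", "Au"] ∧
  basis.toList ≠ [] ∧ basis.toList.headD ' ' ∈ ['s', 'd', 't', 'q']
instance (symbol : String) (basis : String) : Decidable (Pre_get_nao symbol basis) := by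
  unfold Pre_get_nao; infer_instance

def pvWitness_get_nao : String × String := ("H", "szp")

def Spec_get_nao (symbol : String) (basis : String) (out : Int) : Prop := out = get_nao_alt symbol basis
instance (symbol : String) (basis : String) (out : Int) : Decidable (Spec_get_nao symbol basis out) := by unfold Spec_get_nao; infer_instance

-- ===== CLAIM (what is proved, stated in full; the proofs are below) =====
def Claim_equal_get_nao : Prop := ∀ (symbol : String) (basis : String), Dom_get_nao symbol basis → Pre_get_nao symbol basis → Spec_get_nao symbol basis (get_nao symbol basis)

-- ===== LEMMAS AND PROOFS =====

-- A's accumulation loop in closed form, to compare with B's precomputed per-zeta count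
theorem foldl_closed (ls : List Int) (z acc : Int) :
    ls.foldl (fun a l => a + (2 * l + 1) * z) acc = acc + z * (2 * ls.sum + ls.length) := by
  induction ls generalizing acc with
  | nil => simp
  | cons x t ih => simp only [List.foldl, ih, List.sum_cons, List.length_cons]; push_cast; ring

-- under Pre_, A's looked-up valence list and B's precomputed table entry take one of three
-- concrete value pairs
theorem lookup_cases (symbol : String)
    (hs : symbol ∈ ["H", "C", "N", "O", "S", "Li", "Na", "Ni", "Cu", "Pd", "Ag", "Pt", "Au"]) :
    ((valenceConfig.get? symbol).getD [] = [0] ∧ (naoTable.get? symbol).getD (0, 0) = (1, 3)) ∨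
    ((valenceConfig.get? symbol).getD [] = [0, 1] ∧ (naoTable.get? symbol).getD (0, 0) = (4, 5)) ∨
    ((valenceConfig.get? symbol).getD [] = [0, 2] ∧ (naoTable.get? symbol).getD (0, 0) = (6, 3)) := by
  fin_cases hs <;> first
    | (left; constructor <;> decide)
    | (right; left; constructor <;> decide)
    | (right; right; constructor <;> decide)

-- ===== VERDICT (by name: the statement is the Claim_ definition above) =====
theorem get_nao_spec : Claim_equal_get_nao := by
  intro symbol basis _ hpre
  obtain ⟨hs, -, -⟩ := hpre
  unfold Spec_get_nao get_nao get_nao_alt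
  rcases lookup_cases symbol hs with ⟨h1, h2⟩ | ⟨h1, h2⟩ | ⟨h1, h2⟩ <;> rw [h1, h2] <;>
    simp only [foldl_closed, show zetaDictA = zetaDictB from rfl] <;> norm_num [lpolLoop]
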